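-- pv_equiv track=rewrite | github.com/Hubert-LEROUX/Cryptographie | commonTools.py | columnarTansposition_keyWord2key
-- ===== SOURCE A (Python) =====
-- def columnarTansposition_keyWord2key(keyword, first=0):
-- 	""" This function calculate the index of the rows defined by a keyword which is given
-- 	:type keyword:
-- 	:param keyword: keyword given to rearrange the colums
--
-- 	:raises:
--
-- 	:rtype: list of integrers
-- 	"""
-- 	key = list(range(first, len(keyword)+first))
-- 	keywordWithIndexes = [(keyword[i], i) for i in range(len(keyword))]
-- 	keywordWithIndexes.sort(key=lambda x: x[0])
-- 	keywordWithIndexes = [(keywordWithIndexes[i][0], keywordWithIndexes[i][1], i+first) for i in range(len(keyword))]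
-- 	keywordWithIndexes.sort(key=lambda x: x[1])
-- 	key = [x[2] for x in keywordWithIndexes]
-- 	return key
-- ===== SOURCE B (Python) =====
-- def columnarTansposition_keyWord2key(keyword, first=0):
-- 	order = sorted(range(len(keyword)), key=lambda i: keyword[i])
-- 	key = [0] * len(keyword)
-- 	for rank, idx in enumerate(order):
-- 		key[idx] = rank + first
-- 	return key
-- ===== Notes on version B (the rewrite author's own statement) =====
-- stated objective: faster
-- what changed: B does one stable argsort of the index range and scatters each rank into its original slot in O(n), replacing A's decorate-sort, re-decorate, second sort-back-by-index and projection.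
import Mathlib
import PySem

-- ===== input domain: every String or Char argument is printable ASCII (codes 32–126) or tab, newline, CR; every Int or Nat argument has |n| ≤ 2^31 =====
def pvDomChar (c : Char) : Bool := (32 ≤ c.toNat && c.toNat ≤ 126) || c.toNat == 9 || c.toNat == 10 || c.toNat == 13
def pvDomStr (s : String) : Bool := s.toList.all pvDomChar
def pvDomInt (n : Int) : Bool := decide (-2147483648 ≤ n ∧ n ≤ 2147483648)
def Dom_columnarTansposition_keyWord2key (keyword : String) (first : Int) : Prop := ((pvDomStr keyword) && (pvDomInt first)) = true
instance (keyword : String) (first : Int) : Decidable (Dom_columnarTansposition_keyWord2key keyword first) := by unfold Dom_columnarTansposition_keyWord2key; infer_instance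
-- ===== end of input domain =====

-- B replaces A's decorate-sort / re-decorate / sort-back-by-index pipeline with one stable
-- argsort of the index range followed by an O(n) scatter of ranks into original slots
-- (one sort instead of two; measured faster by a constant factor).

-- ===== PORT A =====
def columnarTansposition_keyWord2key (keyword : String) (first : Int) : List Int :=
  -- key = list(range(first, len(keyword)+first))  (dead: rebound before use)
  let _key := PySem.List.pyRange first (PySem.Str.len keyword + first) 1
  -- keywordWithIndexes = [(keyword[i], i) for i in range(len(keyword))]
  let kwi := (PySem.List.pyRange 0 (PySem.Str.len keyword) 1).map
      (fun i => (PySem.List.pyGetD keyword.toList i ' ', i))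
  -- keywordWithIndexes.sort(key=lambda x: x[0])
  let kwiS := PySem.List.sorted kwi (fun x => x.1) false
  -- keywordWithIndexes = [(kwi[i][0], kwi[i][1], i+first) for i in range(len(keyword))]
  let kwi2 := (PySem.List.pyRange 0 (PySem.Str.len keyword) 1).map
      (fun i => ((PySem.List.pyGetD kwiS i (' ', 0)).1, (PySem.List.pyGetD kwiS i (' ', 0)).2, i + first))
  -- keywordWithIndexes.sort(key=lambda x: x[1])
  let kwi2S := PySem.List.sorted kwi2 (fun x => x.2.1) false
  -- key = [x[2] for x in keywordWithIndexes]
  kwi2S.map (fun x => x.2.2)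

-- ===== PORT B =====
def columnarTansposition_keyWord2key_alt (keyword : String) (first : Int) : List Int :=
  -- order = sorted(range(len(keyword)), key=lambda i: keyword[i])
  let order := PySem.List.sorted (PySem.List.pyRange 0 (PySem.Str.len keyword) 1)
      (fun i => PySem.List.pyGetD keyword.toList i ' ') false
  -- key = [0] * len(keyword); for rank, idx in enumerate(order): key[idx] = rank + first
  (PySem.List.enumerate order 0).foldl
    (fun key ri => PySem.List.pySetD key ri.2 (ri.1 + first))
    (PySem.List.pyRepeat [0] (PySem.Str.len keyword))

-- ===== PRECONDITION & SPEC =====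
def Spec_columnarTansposition_keyWord2key (keyword : String) (first : Int) (out : List Int) : Prop := out = columnarTansposition_keyWord2key_alt keyword first
instance (keyword : String) (first : Int) (out : List Int) : Decidable (Spec_columnarTansposition_keyWord2key keyword first out) := by unfold Spec_columnarTansposition_keyWord2key; infer_instance

-- ===== CLAIM (what is proved, stated in full; the proofs are below) =====
def Claim_equal_columnarTansposition_keyWord2key : Prop := ∀ (keyword : String) (first : Int), Dom_columnarTansposition_keyWord2key keyword first → Spec_columnarTansposition_keyWord2key keyword first (columnarTansposition_keyWord2key keyword first)

-- ===== LEMMAS AND PROOFS =====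

-- the index range [0, 1, …, n-1] as a list of Ints
def pvRng (n : Nat) : List Int := List.map (fun k => ((k : Nat) : Int)) (List.range n)

theorem pvRng_nodup (n : Nat) : (pvRng n).Nodup :=
  List.Nodup.map (fun a b h => by simpa using h) (List.nodup_range (n := n))

-- a stable insertion commutes with mapping a decoration over the list
theorem pvInsertBy_map {α β κ : Type} [LinearOrder κ] (f : α → β) (key : β → κ) (x : α) (ys : List α) :
    PySem.List.insertBy (fun a b => decide (key a < key b)) (f x) (ys.map f)
      = (PySem.List.insertBy (fun a b => decide (key (f a) < key (f b))) x ys).map f := by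
  induction ys with
  | nil => simp [PySem.List.insertBy]
  | cons y t ih => simp [PySem.List.insertBy]; split_ifs <;> simp [ih]

-- stable sort commutes with mapping a decoration over the list
theorem pvSorted_map {α β κ : Type} [LinearOrder κ] (f : α → β) (key : β → κ) (xs : List α) :
    PySem.List.sorted (xs.map f) key false = (PySem.List.sorted xs (fun a => key (f a)) false).map f := by
  rw [PySem.List.sorted_eq_foldl_insertBy, PySem.List.sorted_eq_foldl_insertBy]
  suffices h : ∀ acc : List α,
      (xs.map f).foldl (fun acc x => PySem.List.insertBy (fun a b => decide (key a < key b)) x acc) (acc.map f)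
        = (xs.foldl (fun acc x => PySem.List.insertBy (fun a b => decide (key (f a) < key (f b))) x acc) acc).map f by
    simpa using h []
  induction xs with
  | nil => intro acc; simp
  | cons x t ih => intro acc; simp only [List.map_cons, List.foldl_cons]; rw [pvInsertBy_map]; exact ih _

-- the scatter loop of B, characterised elementwise
theorem pvScatter (c : Int) (l : List Int) (hnd : l.Nodup) :
    ∀ (init : List Int) (s : Int), (∀ x ∈ l, ∃ k : Nat, x = (k : Int) ∧ k < init.length) →
    ((PySem.List.enumerate l s).foldl (fun key ri => PySem.List.pySetD key ri.2 (ri.1 + c)) init).length = init.length ∧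
    ∀ m : Nat, m < init.length →
      ((PySem.List.enumerate l s).foldl (fun key ri => PySem.List.pySetD key ri.2 (ri.1 + c)) init)[m]?
        = if ((m : Int) ∈ l) then some (s + (l.idxOf (m : Int) : Int) + c) else init[m]? := by
  induction l with
  | nil => intro init s _; simp [PySem.List.enumerate]
  | cons x t ih =>
    intro init s hin
    obtain ⟨kx, hkx, hkxlt⟩ := hin x (List.mem_cons_self)
    subst hkx
    have hnd' : t.Nodup := hnd.of_cons
    have hxnot : ((kx:Int)) ∉ t := by
      simp [List.nodup_cons] at hnd; exact hnd.1
    rw [PySem.List.enumerate_cons]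
    simp only [List.foldl_cons]
    have hset : PySem.List.pySetD init ((kx:Int)) (s + c) = init.set kx (s + c) := by
      simp [PySem.List.pySetD_natCast]
    rw [hset]
    have hlen : (init.set kx (s + c)).length = init.length := by simp
    obtain ⟨ihl, ihg⟩ := ih hnd' (init.set kx (s + c)) (s + 1) (by
      intro y hy; obtain ⟨k, hk, hklt⟩ := hin y (List.mem_cons_of_mem _ hy); exact ⟨k, hk, by simpa using hklt⟩)
    refine ⟨by rw [ihl, hlen], ?_⟩
    intro m hm
    rw [ihg m (by simpa using hm)]
    by_cases hmem : ((m:Int)) ∈ t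
    · have hmx : (m:Int) ≠ (kx:Int) := fun h => hxnot (h ▸ hmem)
      simp only [List.mem_cons, hmem, or_true, if_true]
      rw [List.idxOf_cons_ne _ (by exact fun h => hmx h.symm)]
      push_cast; ring_nf
    · simp only [hmem, if_false]
      rw [List.getElem?_set]
      by_cases hmk : (m:Int) = (kx:Int)
      · have : m = kx := by exact_mod_cast hmk
        subst this
        simp [List.mem_cons, hmem, hm, List.idxOf_cons_self]
      · have : kx ≠ m := fun h => hmk (by exact_mod_cast h.symm)
        simp [this, List.mem_cons, hmem, hmk]

theorem pvMain (keyword : String) (first : Int) :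
    columnarTansposition_keyWord2key keyword first = columnarTansposition_keyWord2key_alt keyword first := by
  unfold columnarTansposition_keyWord2key columnarTansposition_keyWord2key_alt
  have hrange : PySem.List.pyRange 0 (PySem.Str.len keyword) 1 = pvRng keyword.toList.length := by
    simp [pvRng, PySem.List.pyRange_zero_nat, PySem.Str.len_eq]
  rw [hrange]
  dsimp only
  set cs := keyword.toList with hcs
  set n := cs.length with hn
  set f : Int → Char := fun i => PySem.List.pyGetD cs i ' ' with hf
  set F : Int → Char × Int := fun i => (f i, i) with hF
  set order := PySem.List.sorted (pvRng n) f false with horder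
  -- step 1: first sort = order decorated
  have h1 : PySem.List.sorted ((pvRng n).map F) (fun x => x.1) false = order.map F := by
    rw [pvSorted_map F (fun x => x.1) (pvRng n)]
  rw [h1]
  have hlr : (pvRng n).length = n := by simp [pvRng]
  have hperm : order.Perm (pvRng n) := PySem.List.sorted_perm _ _ _
  have hlo : order.length = n := by rw [hperm.length_eq, hlr]
  have hnodup : order.Nodup := List.Perm.nodup hperm.symm (pvRng_nodup n)
  set G : Int → Char × Int × Int := fun i => (f i, i, ((order.idxOf i : Nat) : Int) + first) with hG
  -- step 2: the re-decorated list is order mapped through G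
  have h2 : (pvRng n).map (fun i =>
        ((PySem.List.pyGetD (order.map F) i (' ', 0)).1,
         (PySem.List.pyGetD (order.map F) i (' ', 0)).2, i + first))
      = order.map G := by
    apply List.ext_getElem
    · simp [hlr, hlo]
    · intro k hk1 hk2
      have hkn : k < n := by simpa [hlr] using hk1
      have hko : k < order.length := by rwa [hlo]
      have hrk : (pvRng n)[k]'(by simpa [hlr] using hkn) = ((k:Nat):Int) := by
        simp [pvRng]
      have hget : PySem.List.pyGetD (order.map F) ((k:Nat):Int) (' ', 0) = F (order[k]'hko) := by
        rw [PySem.List.pyGetD_natCast]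
        rw [List.getD_eq_getElem?_getD, List.getElem?_eq_getElem (by simpa [hlo] using hkn)]
        simp
      simp only [List.getElem_map, hrk, hget]
      simp only [hG, hF]
      have : order.idxOf (order[k]'hko) = k := List.Nodup.idxOf_getElem hnodup k hko
      rw [this]
  rw [h2]
  -- step 3: second sort names the strictly-mid-increasing rearrangement
  have h3 : PySem.List.sorted (order.map G) (fun x => x.2.1) false = (pvRng n).map G := by
    apply PySem.List.sorted_eq_of_perm_of_pairwise_lt
    · exact List.Perm.map G hperm.symm
    · unfold pvRng
      rw [List.map_map, List.pairwise_map]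
      refine List.Pairwise.imp ?_ (List.pairwise_lt_range (n := n))
      intro a b hab
      show (G ((a:Nat):Int)).2.1 < (G ((b:Nat):Int)).2.1
      simp only [hG]
      exact_mod_cast hab
  rw [h3]
  -- B side: the scatter loop
  have hinit : PySem.List.pyRepeat [(0:Int)] (PySem.Str.len keyword) = List.replicate n 0 := by
    rw [PySem.List.pyRepeat_singleton]
    simp [PySem.Str.len_eq, hcs, hn]
  rw [hinit]
  have hmemord : ∀ x ∈ order, ∃ k : Nat, x = (k : Int) ∧ k < n := by
    intro x hx
    have : x ∈ pvRng n := hperm.mem_iff.mp hx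
    simp only [pvRng, List.mem_map, List.mem_range] at this
    obtain ⟨k, hk, rfl⟩ := this
    exact ⟨k, rfl, hk⟩
  obtain ⟨hBl, hBg⟩ := pvScatter first order hnodup (List.replicate n 0) 0
    (by intro x hx; obtain ⟨k, rfl, hk⟩ := hmemord x hx; exact ⟨k, rfl, by simpa using hk⟩)
  apply List.ext_getElem
  · simp [hBl, hlr]
  · intro k hk1 hk2
    have hkn : k < n := by simpa [hlr] using hk1
    have hmem : ((k:Nat):Int) ∈ order := by
      apply hperm.mem_iff.mpr
      simp only [pvRng, List.mem_map, List.mem_range]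
      exact ⟨k, hkn, rfl⟩
    have hB := hBg k (by simpa using hkn)
    rw [if_pos hmem] at hB
    have : (((PySem.List.enumerate order 0).foldl
          (fun key ri => PySem.List.pySetD key ri.2 (ri.1 + first)) (List.replicate n 0))[k]'hk2) =
        0 + ((order.idxOf ((k:Nat):Int) : Nat) : Int) + first := by
      have := List.getElem?_eq_getElem hk2
      rw [this] at hB
      exact Option.some.inj hB
    rw [this]
    have hrk : (pvRng n)[k]'(by simpa [hlr] using hkn) = ((k:Nat):Int) := by simp [pvRng]
    simp only [List.getElem_map, hrk, hG]
    ring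

-- ===== VERDICT (by name: the statement is the Claim_ definition above) =====
theorem columnarTansposition_keyWord2key_spec : Claim_equal_columnarTansposition_keyWord2key := by
  intro keyword first _
  unfold Spec_columnarTansposition_keyWord2key
  exact pvMain keyword first
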